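-- pv_equiv track=rewrite | github.com/colinnnnnnnnnnn/aa-labs | lab3/program.py | balanced_tree
-- ===== SOURCE A (Python) =====
-- def balanced_tree(levels, branching_factor):
-- 	if levels <= 0:
-- 		return {0: []}
--
-- 	graph = {0: []}
-- 	current_level = [0]
-- 	next_node_id = 1
--
-- 	for _ in range(1, levels):
-- 		next_level = []
-- 		for parent in current_level:
-- 			for _ in range(branching_factor):
-- 				child = next_node_id
-- 				next_node_id += 1
-- 				graph.setdefault(parent, []).append(child)
-- 				graph[child] = [parent]
-- 				next_level.append(child)
-- 		current_level = next_level
--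
-- 	return graph
-- ===== SOURCE B (Python) =====
-- def balanced_tree(levels, branching_factor):
--     if levels <= 0 or branching_factor <= 0:
--         return {0: []}
--     b = branching_factor
--     # total node count of a complete b-ary tree with `levels` levels
--     n = levels if b == 1 else (b ** levels - 1) // (b - 1)
--     n_int = (n - 1) // b  # internal nodes: exactly these have (all b) children
--     graph = {}
--     for i in range(n):
--         adj = [] if i == 0 else [(i - 1) // b]
--         if i < n_int:
--             adj.extend(range(b * i + 1, b * i + b + 1))
--         graph[i] = adj
--     return graph
-- ===== Notes on version B (the rewrite author's own statement) =====
-- stated objective: alternative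
-- what changed: Replaces the level-by-level BFS frontier queue with direct heap-style index arithmetic: the total node count N is computed in closed form ((b**levels-1)//(b-1)), then one pass over 0..N-1 emits each node's parent (i-1)//b and children b*i+1..b*i+b clipped at N.
import Mathlib
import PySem

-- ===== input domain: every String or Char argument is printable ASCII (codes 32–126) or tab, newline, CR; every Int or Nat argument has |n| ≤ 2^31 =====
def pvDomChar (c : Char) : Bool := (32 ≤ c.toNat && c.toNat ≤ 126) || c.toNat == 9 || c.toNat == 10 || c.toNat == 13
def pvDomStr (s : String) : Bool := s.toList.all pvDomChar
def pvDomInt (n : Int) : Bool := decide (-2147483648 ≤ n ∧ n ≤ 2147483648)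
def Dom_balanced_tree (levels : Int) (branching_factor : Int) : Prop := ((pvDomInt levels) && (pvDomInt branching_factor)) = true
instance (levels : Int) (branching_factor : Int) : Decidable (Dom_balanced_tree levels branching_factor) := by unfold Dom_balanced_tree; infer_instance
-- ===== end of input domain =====

-- B replaces A's level-by-level BFS frontier queue by direct heap-style index arithmetic
-- (closed-form node count, then one pass emitting parent (i-1)//b and children b*i+1..b*i+b);
-- objective: alternative algorithm of the same cost.

-- ===== PORT A =====
-- innermost body: child = next_node_id; next_node_id += 1;
-- graph.setdefault(parent, []).append(child)  [= d[parent] = d.get(parent, []) + [child], i.e. Dict.modify];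
-- graph[child] = [parent]; next_level.append(child).  state = (graph, next_level-so-far, next_node_id)
def aInner (parent : Int) (st : PySem.Dict Int (List Int) × List Int × Int) :
    PySem.Dict Int (List Int) × List Int × Int :=
  let child := st.2.2
  (((st.1.modify parent [] (fun l => l ++ [child])).insert child [parent]),
    st.2.1 ++ [child], child + 1)

-- 'for _ in range(branching_factor): …'
def aMid (b : Int) (st : PySem.Dict Int (List Int) × List Int × Int) (parent : Int) :
    PySem.Dict Int (List Int) × List Int × Int :=
  (PySem.List.pyRange 0 b 1).foldl (fun s _ => aInner parent s) st

-- one outer iteration: next_level = []; for parent in current_level: …; current_level = next_level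
def aOuter (b : Int) (st : PySem.Dict Int (List Int) × List Int × Int) :
    PySem.Dict Int (List Int) × List Int × Int :=
  st.2.1.foldl (aMid b) (st.1, ([] : List Int), st.2.2)

def balanced_tree (levels : Int) (branching_factor : Int) : List (Int × List Int) :=
  if levels ≤ 0 then [((0 : Int), ([] : List Int))]
  else
    ((PySem.List.pyRange 1 levels 1).foldl (fun s _ => aOuter branching_factor s)
      (PySem.Dict.ofList [((0 : Int), ([] : List Int))], [(0 : Int)], (1 : Int))).1.items

-- ===== PORT B =====
-- n = levels if b == 1 else (b ** levels - 1) // (b - 1)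
def nNodes (levels : Int) (b : Int) : Int :=
  if b = 1 then levels else PySem.Int.floordiv (b ^ levels.toNat - 1) (b - 1)

-- n_int = (n - 1) // b : the internal nodes, exactly these get (all b) children
def nInternal (n : Int) (b : Int) : Int := PySem.Int.floordiv (n - 1) b

-- adj = ([] if i == 0 else [(i-1)//b]); if i < n_int: adj.extend(range(b*i+1, b*i+b+1))
def bEntry (b : Int) (nint : Int) (i : Int) : List Int :=
  (if i = 0 then ([] : List Int) else [PySem.Int.floordiv (i - 1) b]) ++
    (if i < nint then PySem.List.pyRange (b * i + 1) (b * i + b + 1) 1 else [])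

def balanced_tree_alt (levels : Int) (branching_factor : Int) : List (Int × List Int) :=
  if levels ≤ 0 ∨ branching_factor ≤ 0 then [((0 : Int), ([] : List Int))]
  else
    ((PySem.List.pyRange 0 (nNodes levels branching_factor) 1).foldl
      (fun d i => d.insert i
        (bEntry branching_factor (nInternal (nNodes levels branching_factor) branching_factor) i))
      PySem.Dict.empty).items

-- ===== PRECONDITION & SPEC =====
def Spec_balanced_tree (levels : Int) (branching_factor : Int) (out : List (Int × List Int)) : Prop := out = balanced_tree_alt levels branching_factor
instance (levels : Int) (branching_factor : Int) (out : List (Int × List Int)) : Decidable (Spec_balanced_tree levels branching_factor out) := by unfold Spec_balanced_tree; infer_instance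

-- ===== CLAIM (what is proved, stated in full; the proofs are below) =====
def Claim_equal_balanced_tree : Prop := ∀ (levels : Int) (branching_factor : Int), Dom_balanced_tree levels branching_factor → Spec_balanced_tree levels branching_factor (balanced_tree levels branching_factor)

-- ===== LEMMAS AND PROOFS =====

-- closed-form adjacency clipped at node count n (proof-only normal form)
def cEntry (b : Int) (n : Int) (i : Int) : List Int :=
  (if i = 0 then ([] : List Int) else [PySem.Int.floordiv (i - 1) b]) ++
    (PySem.List.pyRange (b * i + 1) (b * i + b + 1) 1).filter (fun c => decide (c < n))

-- the closed-form dictionary, as a Dict (proof-only)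
def gdict (b n : Int) : PySem.Dict Int (List Int) :=
  PySem.Dict.mk ((PySem.List.pyRange 0 n 1).map (fun i => (i, cEntry b n i)))

-- filtering a unit-step range by (< M) truncates it
lemma filter_lt_pyRange (lo hi M : Int) :
    (PySem.List.pyRange lo hi 1).filter (fun c => decide (c < M)) =
      PySem.List.pyRange lo (min hi M) 1 := by
  by_cases h : hi ≤ lo
  · rw [PySem.List.pyRange_one_eq_nil h,
      PySem.List.pyRange_one_eq_nil (le_trans (min_le_left _ _) h)]
    rfl
  · have h' : lo < hi := by omega
    rw [PySem.List.pyRange_one_cons h', List.filter_cons]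
    have hrec := filter_lt_pyRange (lo + 1) hi M
    by_cases hm : lo < M
    · rw [if_pos (decide_eq_true hm), hrec,
        ← PySem.List.pyRange_one_cons (by omega : lo < min hi M)]
    · rw [if_neg (by simpa using hm), hrec,
        PySem.List.pyRange_one_eq_nil (by omega : min hi M ≤ lo + 1),
        PySem.List.pyRange_one_eq_nil (by omega : min hi M ≤ lo)]
termination_by (hi - lo).toNat
decreasing_by omega

lemma cEntry_eq (b n i : Int) :
    cEntry b n i =
      (if i = 0 then ([] : List Int) else [PySem.Int.floordiv (i - 1) b]) ++
        PySem.List.pyRange (b * i + 1) (min (b * i + b + 1) n) 1 := by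
  rw [cEntry, filter_lt_pyRange]

lemma keys_gdict (b n : Int) : (gdict b n).keys = PySem.List.pyRange 0 n 1 := by
  simp [gdict, PySem.Dict.keys, List.map_map, Function.comp_def]

lemma nodup_keys_gdict (b n : Int) : (gdict b n).keys.Nodup := by
  rw [keys_gdict]; exact PySem.List.nodup_pyRange_one 0 n

lemma mem_items_gdict (b n i : Int) (h0 : 0 ≤ i) (hn : i < n) :
    (i, cEntry b n i) ∈ (gdict b n).items := by
  exact List.mem_map_of_mem ((PySem.List.mem_pyRange_one).mpr ⟨h0, hn⟩)

lemma getD_gdict (b n i : Int) (h0 : 0 ≤ i) (hn : i < n) :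
    (gdict b n).getD i [] = cEntry b n i :=
  PySem.Dict.getD_of_mem_items _ (mem_items_gdict b n i h0 hn) (nodup_keys_gdict b n) []

lemma contains_gdict (b n i : Int) (h0 : 0 ≤ i) (hn : i < n) :
    (gdict b n).contains i = true := by
  rw [PySem.Dict.contains_iff_mem_keys, keys_gdict, PySem.List.mem_pyRange_one]
  exact ⟨h0, hn⟩

-- gdict b n has no key ≥ n
lemma not_contains_gdict_self (b n : Int) : (gdict b n).contains n = false := by
  rw [← Bool.not_eq_true, PySem.Dict.contains_iff_mem_keys, keys_gdict,
    PySem.List.mem_pyRange_one]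
  omega

-- the innermost A step advances the closed-form dictionary by one node
lemma step_gdict (b n : Int) (hb : 1 ≤ b) (hn : 1 ≤ n) :
    ((gdict b n).modify (PySem.Int.floordiv (n - 1) b) [] (fun l => l ++ [n])).insert n
        [PySem.Int.floordiv (n - 1) b] = gdict b (n + 1) := by
  have hb0 : (0 : Int) < b := by omega
  set p := PySem.Int.floordiv (n - 1) b with hpdef
  have hpb : p * b ≤ n - 1 ∧ n - 1 < (p + 1) * b :=
    (PySem.Int.floordiv_eq_iff_of_pos hb0).mp hpdef.symm
  have hp0 : 0 ≤ p := by
    rw [hpdef, PySem.Int.floordiv_eq_ediv_of_pos hb0]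
    exact Int.ediv_nonneg (by omega) (by omega)
  have hbp1 : b * p + 1 ≤ n := by nlinarith [hpb.1]
  have hbp2 : n ≤ b * p + b := by nlinarith [hpb.2]
  have hpn : p < n := by nlinarith
  have hmod : (gdict b n).modify p [] (fun l => l ++ [n]) =
      (gdict b n).insert p (cEntry b n p ++ [n]) := by
    rw [PySem.Dict.modify, getD_gdict b n p hp0 hpn]
  have hnc : ((gdict b n).insert p (cEntry b n p ++ [n])).contains n = false := by
    rw [PySem.Dict.contains_insert, not_contains_gdict_self, Bool.or_false]
    simp only [beq_eq_false_iff_ne, ne_eq]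
    omega
  rw [hmod]
  apply PySem.Dict.ext
  rw [PySem.Dict.items_insert_of_not_contains _ _ hnc,
    PySem.Dict.items_insert_of_contains _ _ (contains_gdict b n p hp0 hpn)]
  show (((PySem.List.pyRange 0 n 1).map (fun i => (i, cEntry b n i))).map
        (fun q => if q.1 == p then (p, cEntry b n p ++ [n]) else q)) ++ [(n, [p])]
      = (PySem.List.pyRange 0 (n + 1) 1).map (fun i => (i, cEntry b (n + 1) i))
  rw [PySem.List.pyRange_one_succ_right (by omega : (0:Int) ≤ n), List.map_append,
    List.map_map]
  congr 1
  · apply List.map_congr_left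
    intro i hi
    rw [PySem.List.mem_pyRange_one] at hi
    simp only [Function.comp_apply]
    by_cases hip : i = p
    · simp only [hip, beq_self_eq_true, if_true]
      refine congrArg (Prod.mk p) ?_
      rw [cEntry_eq, cEntry_eq]
      have h1 : min (b * p + b + 1) n = n := by omega
      have h2 : min (b * p + b + 1) (n + 1) = n + 1 := by omega
      rw [h1, h2, List.append_assoc,
        ← PySem.List.pyRange_one_succ_right (by omega : b * p + 1 ≤ n)]
    · have hne : (i == p) = false := by simp [hip]
      simp only [hne, Bool.false_eq_true, if_false]
      refine congrArg (Prod.mk i) ?_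
      have hni : ¬(b * i + 1 ≤ n ∧ n ≤ b * i + b) := by
        intro hcon
        apply hip
        rw [hpdef]
        symm
        rw [PySem.Int.floordiv_eq_iff_of_pos hb0]
        constructor
        · nlinarith [hcon.1]
        · nlinarith [hcon.2]
      rw [cEntry_eq, cEntry_eq]
      congr 1
      rcases (by omega : n ≤ b * i ∨ b * i + b + 1 ≤ n) with hc | hc
      · rw [PySem.List.pyRange_one_eq_nil (by omega : min (b * i + b + 1) n ≤ b * i + 1),
          PySem.List.pyRange_one_eq_nil (by omega : min (b * i + b + 1) (n + 1) ≤ b * i + 1)]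
      · have h1 : min (b * i + b + 1) n = b * i + b + 1 := by omega
        have h2 : min (b * i + b + 1) (n + 1) = b * i + b + 1 := by omega
        rw [h1, h2]
  · refine congrArg (fun x => [x]) (congrArg (Prod.mk n) ?_)
    rw [cEntry_eq]
    have hn0 : ¬(n = 0) := by omega
    have hmin : min (b * n + b + 1) (n + 1) ≤ b * n + 1 := by nlinarith [min_le_right (b * n + b + 1) (n + 1)]
    rw [if_neg hn0, PySem.List.pyRange_one_eq_nil hmin, List.append_nil]

-- inner loop: 'for _ in range(branching_factor)' at parent p, j iterations done
lemma inner_loop (b p : Int) (hb : 1 ≤ b) (hp : 0 ≤ p) :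
    ∀ (j : Nat), (j : Int) ≤ b → ∀ nl : List Int,
      (PySem.List.pyRange 0 (j : Int) 1).foldl (fun s _ => aInner p s)
          (gdict b (b * p + 1), nl, b * p + 1)
        = (gdict b (b * p + (j : Int) + 1),
            nl ++ PySem.List.pyRange (b * p + 1) (b * p + (j : Int) + 1) 1,
            b * p + (j : Int) + 1) := by
  intro j
  induction j with
  | zero =>
    intro _ nl
    rw [Nat.cast_zero, PySem.List.pyRange_one_eq_nil (by omega), List.foldl_nil,
      PySem.List.pyRange_one_eq_nil (by omega : b * p + 0 + 1 ≤ b * p + 1)]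
    simp
  | succ j ih =>
    intro hj nl
    have hj' : (j : Int) ≤ b := by push_cast at hj ⊢; omega
    have hjb : (j : Int) < b := by push_cast at hj; omega
    have hcast : ((j + 1 : Nat) : Int) = (j : Int) + 1 := by push_cast; ring
    rw [hcast, PySem.List.pyRange_one_succ_right (by positivity : (0:Int) ≤ (j:Int)),
      List.foldl_append, ih hj' nl, List.foldl_cons, List.foldl_nil]
    have hbp : 0 ≤ b * p := mul_nonneg (by omega) hp
    have hfd : PySem.Int.floordiv (b * p + (j : Int) + 1 - 1) b = p := by
      rw [PySem.Int.floordiv_eq_iff_of_pos (by omega : (0:Int) < b)]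
      constructor
      · nlinarith
      · nlinarith
    have hstep := step_gdict b (b * p + (j : Int) + 1) hb (by omega)
    rw [hfd] at hstep
    simp only [aInner]
    rw [hstep, List.append_assoc,
      ← PySem.List.pyRange_one_succ_right (by omega : b * p + 1 ≤ b * p + (j:Int) + 1)]
    have harr : b * p + (j:Int) + 1 + 1 = b * p + ((j:Int) + 1) + 1 := by ring
    rw [harr]

-- middle loop: 'for parent in current_level' over the frontier [q, q+k)
lemma mid_loop (b : Int) (hb : 1 ≤ b) :
    ∀ (k : Nat) (q : Int), 0 ≤ q → ∀ nl : List Int,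
      (PySem.List.pyRange q (q + (k : Int)) 1).foldl (aMid b)
          (gdict b (b * q + 1), nl, b * q + 1)
        = (gdict b (b * (q + (k : Int)) + 1),
            nl ++ PySem.List.pyRange (b * q + 1) (b * (q + (k : Int)) + 1) 1,
            b * (q + (k : Int)) + 1) := by
  intro k
  induction k with
  | zero =>
    intro q hq nl
    rw [Nat.cast_zero, add_zero, PySem.List.pyRange_one_eq_nil (le_refl q), List.foldl_nil,
      PySem.List.pyRange_one_eq_nil (le_refl (b * q + 1))]
    simp
  | succ k ih =>
    intro q hq nl
    have hcast : ((k + 1 : Nat) : Int) = (k : Int) + 1 := by push_cast; ring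
    rw [hcast, PySem.List.pyRange_one_cons (by omega : q < q + ((k:Int) + 1)), List.foldl_cons]
    have hmid : aMid b (gdict b (b * q + 1), nl, b * q + 1) q
        = (gdict b (b * (q + 1) + 1),
            nl ++ PySem.List.pyRange (b * q + 1) (b * (q + 1) + 1) 1, b * (q + 1) + 1) := by
      have := inner_loop b q hb hq b.toNat (by rw [Int.toNat_of_nonneg (by omega)]) nl
      rw [Int.toNat_of_nonneg (by omega : (0:Int) ≤ b)] at this
      rw [aMid, this]
      have h1 : b * q + b + 1 = b * (q + 1) + 1 := by ring
      rw [h1]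
    rw [hmid]
    have h2 : q + ((k:Int) + 1) = (q + 1) + (k : Int) := by ring
    rw [h2, ih (q + 1) (by omega), List.append_assoc,
      ← PySem.List.pyRange_one_append (b * q + 1) (b * (q + 1) + 1) (b * ((q + 1) + (k:Int)) + 1)
        (by nlinarith) (by nlinarith)]

-- one full outer iteration on the invariant state
lemma outer_step (b q : Int) (hb : 1 ≤ b) (hq : 0 ≤ q) :
    aOuter b (gdict b (b * q + 1), PySem.List.pyRange q (b * q + 1) 1, b * q + 1)
      = (gdict b (b * (b * q + 1) + 1),
          PySem.List.pyRange (b * q + 1) (b * (b * q + 1) + 1) 1, b * (b * q + 1) + 1) := by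
  have hqle : q ≤ b * q + 1 := by nlinarith
  have hk : q + ((b * q + 1 - q).toNat : Int) = b * q + 1 := by
    rw [Int.toNat_of_nonneg (by omega)]; ring
  have := mid_loop b hb (b * q + 1 - q).toNat q hq []
  rw [hk] at this
  rw [aOuter]
  simpa using this

-- node-count recurrence: h_{m+1} = b*h_m + 1, h_0 = 1
def geomA (b : Int) : Nat → Int
  | 0 => 1
  | m + 1 => b * geomA b m + 1

lemma geomA_pos (b : Int) (hb : 1 ≤ b) : ∀ m : Nat, 1 ≤ geomA b m := by
  intro m
  induction m with
  | zero => simp [geomA]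
  | succ m ih => simp only [geomA]; nlinarith

-- state after m outer iterations
lemma outer_iter (b : Int) (hb : 1 ≤ b) :
    ∀ m : Nat, ∃ q : Int, 0 ≤ q ∧ geomA b m = b * q + 1 ∧
      (aOuter b)^[m] (gdict b 1, PySem.List.pyRange 0 1 1, 1)
        = (gdict b (geomA b m), PySem.List.pyRange q (geomA b m) 1, geomA b m) := by
  intro m
  induction m with
  | zero =>
    refine ⟨0, le_refl 0, by simp [geomA], ?_⟩
    simp [geomA]
  | succ m ih =>
    obtain ⟨q, hq0, hgeo, hst⟩ := ih
    refine ⟨geomA b m, by have := geomA_pos b hb m; omega, by simp [geomA], ?_⟩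
    rw [Function.iterate_succ_apply', hst, hgeo, outer_step b q hb hq0, ← hgeo]
    simp [geomA]

-- A's result in closed form (levels ≥ 1, b ≥ 1)
lemma A_closed (levels b : Int) (h1 : 1 ≤ levels) (hb : 1 ≤ b) :
    balanced_tree levels b = (gdict b (geomA b (levels - 1).toNat)).items := by
  obtain ⟨q, hq0, hgeo, hst⟩ := outer_iter b hb (levels - 1).toNat
  have hr : PySem.List.pyRange 0 1 1 = [(0 : Int)] := by decide
  have hb0 : cEntry b 1 0 = [] := by
    rw [cEntry_eq, if_pos rfl, List.nil_append, PySem.List.pyRange_one_eq_nil]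
    have := min_le_right (b * 0 + b + 1) (1 : Int)
    simp only [mul_zero] at this ⊢
    omega
  have hgd1 : gdict b 1 = PySem.Dict.ofList [((0 : Int), ([] : List Int))] := by
    apply PySem.Dict.ext
    show ((PySem.List.pyRange 0 1 1).map fun i => (i, cEntry b 1 i)) = _
    rw [hr]
    simp only [List.map_cons, List.map_nil, hb0]
    decide
  rw [hr, hgd1] at hst
  rw [balanced_tree, if_neg (by omega), List.foldl_const (aOuter b),
    PySem.List.length_pyRange_one, hst]

lemma geomA_one (m : Nat) : geomA 1 m = (m : Int) + 1 := by
  induction m with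
  | zero => simp [geomA]
  | succ m ih => simp only [geomA, ih]; push_cast; ring

lemma geomA_mul (b : Int) (m : Nat) : (b - 1) * geomA b m = b ^ (m + 1) - 1 := by
  induction m with
  | zero => simp [geomA]
  | succ m ih =>
    simp only [geomA]
    have h : (b - 1) * (b * geomA b m + 1) = b * ((b - 1) * geomA b m) + (b - 1) := by ring
    rw [h, ih]
    ring

-- B's closed-form node count equals A's level recurrence
lemma nNodes_eq (levels b : Int) (h1 : 1 ≤ levels) (hb : 1 ≤ b) :
    nNodes levels b = geomA b (levels - 1).toNat := by
  rw [nNodes]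
  by_cases hb1 : b = 1
  · subst hb1
    rw [if_pos rfl, geomA_one, Int.toNat_of_nonneg (by omega)]
    ring
  · rw [if_neg hb1]
    have hlt : levels.toNat = (levels - 1).toNat + 1 := by omega
    rw [hlt, ← geomA_mul b (levels - 1).toNat,
      PySem.Int.floordiv_eq_ediv_of_pos (by omega : (0 : Int) < b - 1)]
    have hsub : (b - 1) * geomA b (levels - 1).toNat + 1 - 1
        = (b - 1) * geomA b (levels - 1).toNat := by ring
    exact Int.mul_ediv_cancel_left _ (by omega)

-- (n-1) is exactly divisible by b for the geometric node counts
lemma geomA_div (b : Int) (hb : 1 ≤ b) (m : Nat) :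
    b * PySem.Int.floordiv (geomA b m - 1) b = geomA b m - 1 := by
  cases m with
  | zero =>
    have h0 : PySem.Int.floordiv ((1:Int) - 1) b = 0 := by
      rw [PySem.Int.floordiv_eq_iff_of_pos (by omega : (0:Int) < b)]
      constructor <;> omega
    show b * PySem.Int.floordiv (1 - 1) b = 1 - 1
    rw [h0]
    ring
  | succ m =>
    have hg := geomA_pos b hb m
    have h0 : PySem.Int.floordiv (b * geomA b m + 1 - 1) b = geomA b m := by
      rw [PySem.Int.floordiv_eq_iff_of_pos (by omega : (0:Int) < b)]
      constructor
      · nlinarith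
      · nlinarith
    simp only [geomA]
    rw [show b * geomA b m + 1 - 1 = b * geomA b m by ring] at h0 ⊢
    rw [h0]

-- when b divides n-1, B's internal-node test agrees with clipping at n
lemma bEntry_eq_cEntry (b n i : Int) (hb : 1 ≤ b)
    (hdiv : b * PySem.Int.floordiv (n - 1) b = n - 1) :
    bEntry b (nInternal n b) i = cEntry b n i := by
  rw [bEntry, nInternal, cEntry, filter_lt_pyRange]
  congr 1
  set q := PySem.Int.floordiv (n - 1) b with hq
  by_cases hlt : i < q
  · rw [if_pos hlt]
    have hle : b * (i + 1) ≤ b * q :=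
      mul_le_mul_of_nonneg_left (by omega) (by omega)
    have hexp : b * (i + 1) = b * i + b := by ring
    have hmin : min (b * i + b + 1) n = b * i + b + 1 := by omega
    rw [hmin]
  · rw [if_neg hlt]
    have hle : b * q ≤ b * i :=
      mul_le_mul_of_nonneg_left (by omega) (by omega)
    rw [PySem.List.pyRange_one_eq_nil (by
      have := min_le_right (b * i + b + 1) n
      omega : min (b * i + b + 1) n ≤ b * i + 1)]

-- B's fold builds exactly the closed-form items list
lemma B_closed (levels b : Int) (h1 : 1 ≤ levels) (hb : 1 ≤ b) :
    balanced_tree_alt levels b = (gdict b (nNodes levels b)).items := by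
  rw [balanced_tree_alt, if_neg (by omega : ¬(levels ≤ 0 ∨ b ≤ 0))]
  rw [PySem.Dict.items_foldl_insert_fresh (PySem.List.pyRange 0 (nNodes levels b) 1)
      (fun i => i) (fun i => bEntry b (nInternal (nNodes levels b) b) i) PySem.Dict.empty
      (fun a _ => PySem.Dict.contains_empty a)
      (by rw [List.map_id']; exact PySem.List.nodup_pyRange_one _ _)]
  show [] ++ _ = _
  rw [List.nil_append]
  apply List.map_congr_left
  intro i _
  have hdiv : b * PySem.Int.floordiv (nNodes levels b - 1) b = nNodes levels b - 1 := by
    rw [nNodes_eq levels b h1 hb]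
    exact geomA_div b hb (levels - 1).toNat
  rw [bEntry_eq_cEntry b (nNodes levels b) i hb hdiv]

-- with branching_factor ≤ 0 the inner range is empty: the graph never changes
lemma aOuter_edge (b : Int) (hb : b ≤ 0) (st : PySem.Dict Int (List Int) × List Int × Int) :
    aOuter b st = (st.1, [], st.2.2) := by
  rw [aOuter]
  have hm : ∀ (s : PySem.Dict Int (List Int) × List Int × Int) (p : Int), aMid b s p = s := by
    intro s p
    rw [aMid, PySem.List.pyRange_one_eq_nil hb, List.foldl_nil]
  have key : ∀ (l : List Int) (s : PySem.Dict Int (List Int) × List Int × Int),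
      l.foldl (aMid b) s = s := by
    intro l
    induction l with
    | nil => intro s; rfl
    | cons x xs ih => intro s; rw [List.foldl_cons, hm s x]; exact ih s
  exact key st.2.1 _

lemma fold_fst_edge (b : Int) (hb : b ≤ 0) :
    ∀ (l : List Int) (st : PySem.Dict Int (List Int) × List Int × Int),
      (l.foldl (fun s _ => aOuter b s) st).1 = st.1 := by
  intro l
  induction l with
  | nil => intro st; rfl
  | cons x xs ih =>
    intro st
    rw [List.foldl_cons, aOuter_edge b hb st, ih]

lemma A_edge (levels b : Int) (h1 : 1 ≤ levels) (hb : b ≤ 0) :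
    balanced_tree levels b = [((0 : Int), ([] : List Int))] := by
  rw [balanced_tree, if_neg (by omega), fold_fst_edge b hb]
  decide

-- ===== VERDICT (by name: the statement is the Claim_ definition above) =====
theorem balanced_tree_spec : Claim_equal_balanced_tree := by
  intro levels b _
  unfold Spec_balanced_tree
  by_cases h1 : levels ≤ 0
  · rw [balanced_tree, if_pos h1, balanced_tree_alt, if_pos (Or.inl h1)]
  · by_cases hb : b ≤ 0
    · rw [A_edge levels b (by omega) hb, balanced_tree_alt, if_pos (Or.inr hb)]
    · rw [A_closed levels b (by omega) (by omega), B_closed levels b (by omega) (by omega),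
        nNodes_eq levels b (by omega) (by omega)]
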